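-- pv_equiv track=rewrite | github.com/alessandrodolci/adventofcode-20 | day6/check-custom-declarations.py | get_sum_with_anyone_answers
-- ===== SOURCE A (Python) =====
-- def get_sum_with_anyone_answers(lines):
--     result = 0
--     current_group_questions = set()
--
--     for line in lines:
--         if line.isspace():
--             result += len(current_group_questions)
--             current_group_questions.clear()
--         else:
--             for question in line.strip():
--                 current_group_questions.add(question)
--     result += len(current_group_questions)
--
--     return result
-- ===== SOURCE B (Python) =====
-- def get_sum_with_anyone_answers(lines):
--     groups = []
--     current = []
--     for line in lines:
--         if line.isspace():
--             groups.append(current)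
--             current = []
--         else:
--             current.append(line.strip())
--     groups.append(current)
--     return sum(len(set(''.join(g))) for g in groups)
-- ===== Notes on version B (the rewrite author's own statement) =====
-- stated objective: alternative
-- what changed: B first partitions the lines into explicit per-group lists of stripped lines, then in a separate pass counts the distinct characters of each group's concatenation and sums them, instead of A's single loop maintaining one running set and accumulator.
import Mathlib
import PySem

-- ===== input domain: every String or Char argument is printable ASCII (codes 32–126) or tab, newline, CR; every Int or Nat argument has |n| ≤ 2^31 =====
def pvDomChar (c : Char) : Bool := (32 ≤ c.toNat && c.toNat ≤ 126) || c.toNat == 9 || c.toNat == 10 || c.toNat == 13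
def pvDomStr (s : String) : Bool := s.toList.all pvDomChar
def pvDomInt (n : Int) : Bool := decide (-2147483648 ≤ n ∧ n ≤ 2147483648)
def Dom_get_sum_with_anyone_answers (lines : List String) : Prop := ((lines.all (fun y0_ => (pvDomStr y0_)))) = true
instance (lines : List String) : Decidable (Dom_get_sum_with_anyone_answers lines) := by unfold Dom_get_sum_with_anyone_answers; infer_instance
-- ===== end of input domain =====

-- B partitions the lines into explicit per-group lists first, then counts each group's
-- distinct characters in a separate pass, instead of A's single running set + accumulator.


-- ===== PORT A =====
-- A's loop body: on a whitespace line flush the running set into the accumulator,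
-- otherwise add every character of the stripped line to the running set.
def pvStepA (st : Int × PySem.Set Char) (line : String) : Int × PySem.Set Char :=
  if PySem.Str.strIsspace line then
    (st.1 + PySem.Set.len st.2, PySem.Set.empty)
  else
    (st.1, (PySem.Str.strip line).toList.foldl PySem.Set.add st.2)

def get_sum_with_anyone_answers (lines : List String) : Int :=
  let st := lines.foldl pvStepA (0, PySem.Set.empty)
  st.1 + PySem.Set.len st.2

-- ===== PORT B =====
-- B's loop body: on a whitespace line close the current group, otherwise append
-- the stripped line to the current group.
def pvStepB (p : List (List String) × List String) (line : String) :
    List (List String) × List String :=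
  if PySem.Str.strIsspace line then (p.1 ++ [p.2], ([] : List String))
  else (p.1, p.2 ++ [PySem.Str.strip line])

def get_sum_with_anyone_answers_alt (lines : List String) : Int :=
  let p := lines.foldl pvStepB (([] : List (List String)), ([] : List String))
  let groups := p.1 ++ [p.2]
  (groups.map (fun g =>
    PySem.Set.len (PySem.Set.ofList (PySem.Str.join "" g).toList))).sum

-- ===== PRECONDITION & SPEC =====
def Spec_get_sum_with_anyone_answers (lines : List String) (out : Int) : Prop := out = get_sum_with_anyone_answers_alt lines
instance (lines : List String) (out : Int) : Decidable (Spec_get_sum_with_anyone_answers lines out) := by unfold Spec_get_sum_with_anyone_answers; infer_instance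

-- ===== CLAIM (what is proved, stated in full; the proofs are below) =====
def Claim_equal_get_sum_with_anyone_answers : Prop := ∀ (lines : List String), Dom_get_sum_with_anyone_answers lines → Spec_get_sum_with_anyone_answers lines (get_sum_with_anyone_answers lines)

-- ===== LEMMAS AND PROOFS =====

-- count of distinct characters of one group (B's summand)
def pvCount (g : List String) : Int :=
  PySem.Set.len (PySem.Set.ofList (PySem.Str.join "" g).toList)

-- the groups B's fold produces, as a structural recursion (proof vehicle)
def pvGroups : List String → List String → List (List String)
  | [], cur => [cur]
  | l :: rest, cur =>
      if PySem.Str.strIsspace l then cur :: pvGroups rest []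
      else pvGroups rest (cur ++ [PySem.Str.strip l])

lemma join_empty_flatten (ls : List (List Char)) : PySem.Chars.join [] ls = ls.flatten := by
  induction ls with
  | nil => simp [PySem.Chars.join_nil]
  | cons a t ih =>
    cases t with
    | nil => simp [PySem.Chars.join_singleton]
    | cons b t2 => simp [PySem.Chars.join_cons_cons] at *; simp [ih]

lemma pvCount_eq (g : List String) :
    pvCount g = PySem.Set.len (PySem.Set.ofList (g.map String.toList).flatten) := by
  simp [pvCount, PySem.Str.toList_join, join_empty_flatten]

-- B's fold equals pvGroups (generalizing the accumulated prefix of groups)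
lemma bfold_eq_groups (lines : List String) (gs : List (List String)) (cur : List String) :
    (lines.foldl pvStepB (gs, cur)).1 ++ [(lines.foldl pvStepB (gs, cur)).2]
      = gs ++ pvGroups lines cur := by
  induction lines generalizing gs cur with
  | nil => simp [pvGroups]
  | cons l rest ih =>
    by_cases h : PySem.Str.strIsspace l = true
    · simp only [List.foldl_cons, pvStepB, h, if_pos, pvGroups]
      rw [ih]; simp
    · simp only [List.foldl_cons, pvStepB, h, if_neg, pvGroups, Bool.false_eq_true, not_false_eq_true]
      rw [ih]

-- A's loop, run from (res, set of the characters of cur), ends at res + Σ pvCount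
lemma afold_eq (lines : List String) (res : Int) (cur : List String) :
    (lines.foldl pvStepA (res, PySem.Set.ofList (cur.map String.toList).flatten)).1
      + PySem.Set.len
          (lines.foldl pvStepA (res, PySem.Set.ofList (cur.map String.toList).flatten)).2
    = res + ((pvGroups lines cur).map pvCount).sum := by
  induction lines generalizing res cur with
  | nil => simp [pvGroups, pvCount_eq]
  | cons l rest ih =>
    by_cases h : PySem.Str.strIsspace l = true
    · simp only [List.foldl_cons, pvStepA, h, if_pos, pvGroups]
      have e : (PySem.Set.empty : PySem.Set Char)
          = PySem.Set.ofList (([] : List String).map String.toList).flatten := rfl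
      rw [e, ih]
      simp [pvCount_eq]
      ring
    · simp only [List.foldl_cons, pvStepA, h, if_neg, pvGroups, Bool.false_eq_true,
        not_false_eq_true]
      have h1 : (PySem.Str.strip l).toList.foldl PySem.Set.add
            (PySem.Set.ofList (cur.map String.toList).flatten)
          = PySem.Set.ofList ((cur ++ [PySem.Str.strip l]).map String.toList).flatten := by
        simp only [List.map_append, List.flatten_append, PySem.Set.ofList_eq_foldl,
          List.foldl_append, List.map_cons, List.map_nil, List.flatten_cons,
          List.flatten_nil, List.append_nil]
      rw [h1, ih]

-- ===== VERDICT (by name: the statement is the Claim_ definition above) =====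
theorem get_sum_with_anyone_answers_spec : Claim_equal_get_sum_with_anyone_answers := by
  intro lines _
  show get_sum_with_anyone_answers lines = get_sum_with_anyone_answers_alt lines
  unfold get_sum_with_anyone_answers get_sum_with_anyone_answers_alt
  have ha := afold_eq lines 0 []
  have hb := bfold_eq_groups lines [] []
  simp only [List.map_nil, List.flatten_nil] at ha
  have e : (PySem.Set.ofList ([] : List Char)) = (PySem.Set.empty : PySem.Set Char) := rfl
  rw [e] at ha
  simp only [ha, hb, List.nil_append, zero_add]
  rfl
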